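-- pv_equiv track=rewrite | github.com/hsw1005/algorithm_py | BOJ/8958.py | solution
-- ===== SOURCE A (Python) =====
-- def solution(str):
--     temp = str.split("X")               # "X"를 기준으로 자르고, "O"만 남은 배열을 만든다.
--
--     answer = 0
--     for i in range(0, len(temp)):
--         if len(temp[i]) != 0:       # "X"였던 문자열 부분은 ""으로 남는데, 이는 len("")이 0이다.
--             os = len(temp[i])           # "O"들의 길이를 구한다.
--             oses = int((os+1)*os / 2)   # 덧셈 시그마 공식. 각 "O"들의 합을 계산한다.
--             answer += oses              # "O"들의 총 합을 구한다.
--         else: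
--             pass
--     return answer
-- ===== SOURCE B (Python) =====
-- def solution(str):
--     answer = 0
--     streak = 0
--     for ch in str:
--         if ch == "X":
--             streak = 0
--         else:
--             streak += 1
--             answer += streak
--     return answer
-- ===== Notes on version B (the rewrite author's own statement) =====
-- stated objective: idiomatic
-- what changed: Replaces split-on-X plus a closed-form triangular sum per run with a single incremental scan that keeps a running streak counter and accumulates it.
import Mathlib
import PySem

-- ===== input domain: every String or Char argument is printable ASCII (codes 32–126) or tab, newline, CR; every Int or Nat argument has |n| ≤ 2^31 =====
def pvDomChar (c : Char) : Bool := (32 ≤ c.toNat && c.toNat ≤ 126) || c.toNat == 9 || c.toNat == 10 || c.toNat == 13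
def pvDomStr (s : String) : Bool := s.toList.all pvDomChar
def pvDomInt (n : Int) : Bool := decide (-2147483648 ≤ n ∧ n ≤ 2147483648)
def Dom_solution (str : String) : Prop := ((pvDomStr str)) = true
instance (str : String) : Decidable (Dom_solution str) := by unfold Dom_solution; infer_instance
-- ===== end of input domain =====

-- B replaces A's split-on-"X" + per-run triangular formula with a single streak-accumulating scan (idiomatic; same cost).

-- ===== PORT A =====
-- str.split("X") = PySem.Chars.splitOn str.toList ['X'] (sep ≠ "", exact).
-- int((os+1)*os / 2): (os+1)*os is even and nonnegative, so Python's true division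
-- followed by int() equals exact integer division; ported as Int division (exact here).
def solution (str : String) : Int :=
  let temp := PySem.Chars.splitOn str.toList ['X']
  temp.foldl
    (fun answer t =>
      if (t.length : Int) ≠ 0 then
        let os : Int := t.length
        let oses : Int := ((os + 1) * os) / 2
        answer + oses
      else answer) 0

-- ===== PORT B =====
def solution_alt (str : String) : Int :=
  (str.toList.foldl
    (fun (p : Int × Int) ch =>
      if ch = 'X' then (0, p.2) else (p.1 + 1, p.2 + (p.1 + 1))) (0, 0)).2

-- ===== PRECONDITION & SPEC =====
def Spec_solution (str : String) (out : Int) : Prop := out = solution_alt str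
instance (str : String) (out : Int) : Decidable (Spec_solution str out) := by unfold Spec_solution; infer_instance

-- ===== CLAIM (what is proved, stated in full; the proofs are below) =====
def Claim_equal_solution : Prop := ∀ (str : String), Dom_solution str → Spec_solution str (solution str)

-- ===== LEMMAS AND PROOFS =====

-- triangular number over Int (A's per-run closed form)
def pvTri (n : Nat) : Int := (((n : Int) + 1) * n) / 2

theorem pvTri_zero : pvTri 0 = 0 := by decide

theorem pvTri_succ (n : Nat) : pvTri (n + 1) = pvTri n + (n + 1) := by
  unfold pvTri; push_cast
  have h : ((n : Int) + 1 + 1) * ((n : Int) + 1)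
      = ((n : Int) + 1) * (n : Int) + 2 * ((n : Int) + 1) := by ring
  have h2 : ∃ k : Int, ((n : Int) + 1) * (n : Int) = 2 * k := by
    rcases Int.even_mul_succ_self (n : Int) with ⟨k, hk⟩
    exact ⟨k, by rw [show ((n:Int)+1)*(n:Int) = (n:Int)*((n:Int)+1) by ring]; omega⟩
  rcases h2 with ⟨k, hk⟩
  omega

-- reference splitter: pvSplit l cur = the pieces of (cur.reverse ++ l) split on 'X'
def pvSplit : List Char → List Char → List (List Char)
  | [], cur => [cur.reverse]
  | c :: rest, cur => if c = 'X' then cur.reverse :: pvSplit rest [] else pvSplit rest (c :: cur)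

theorem pvSplit_go (fuel : Nat) (l cur : List Char) (acc : List (List Char))
    (h : l.length ≤ fuel) :
    PySem.Chars.splitOn.go ['X'] fuel l cur acc = acc.reverse ++ pvSplit l cur := by
  induction fuel generalizing l cur acc with
  | zero =>
    have : l = [] := by cases l <;> simp_all
    subst this
    simp [PySem.Chars.splitOn.go, pvSplit]
  | succ fuel ih =>
    cases l with
    | nil => simp [PySem.Chars.splitOn.go, pvSplit]
    | cons c rest =>
      have hlen : rest.length ≤ fuel := by simpa using h
      by_cases hc : c = 'X'
      · subst hc
        rw [show PySem.Chars.splitOn.go ['X'] (fuel + 1) ('X' :: rest) cur acc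
            = PySem.Chars.splitOn.go ['X'] fuel rest [] (cur.reverse :: acc) from by
          simp [PySem.Chars.splitOn.go, List.isPrefixOf]]
        rw [ih _ _ _ hlen]
        simp [pvSplit]
      · have hcx : ('X' == c) = false := by
          simp only [beq_eq_false_iff_ne, ne_eq]
          exact fun e => hc e.symm
        rw [show PySem.Chars.splitOn.go ['X'] (fuel + 1) (c :: rest) cur acc
            = PySem.Chars.splitOn.go ['X'] fuel rest (c :: cur) acc from by
          simp [PySem.Chars.splitOn.go, List.isPrefixOf, hcx]]
        rw [ih _ _ _ hlen]
        simp [pvSplit, hc]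

theorem splitOn_eq_pvSplit (l : List Char) :
    PySem.Chars.splitOn l ['X'] = pvSplit l [] := by
  unfold PySem.Chars.splitOn
  rw [pvSplit_go _ _ _ _ (by omega)]
  simp

-- A's fold is additive in its accumulator: it adds the triangular sum of the piece lengths
theorem pvFoldA (pieces : List (List Char)) (a : Int) :
    pieces.foldl
      (fun answer t =>
        if (t.length : Int) ≠ 0 then
          let os : Int := t.length
          let oses : Int := ((os + 1) * os) / 2
          answer + oses
        else answer) a
    = a + (pieces.map (fun t => pvTri t.length)).sum := by
  induction pieces generalizing a with
  | nil => simp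
  | cons t rest ih =>
    simp only [List.foldl, List.map, List.sum_cons]
    by_cases h : (t.length : Int) ≠ 0
    · rw [if_pos h, ih]; unfold pvTri; ring
    · rw [if_neg h]
      have ht : t.length = 0 := by omega
      rw [ih, ht, pvTri_zero]; ring

-- core invariant: B's scan from streak cur.length equals the triangular sum over pvSplit
theorem pvMain (l : List Char) (cur : List Char) (ans : Int) :
    (l.foldl
      (fun (p : Int × Int) ch =>
        if ch = 'X' then (0, p.2) else (p.1 + 1, p.2 + (p.1 + 1)))
      ((cur.length : Int), ans)).2 + pvTri cur.length
    = ans + ((pvSplit l cur).map (fun t => pvTri t.length)).sum := by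
  induction l generalizing cur ans with
  | nil => simp [pvSplit]
  | cons c rest ih =>
    simp only [List.foldl, pvSplit]
    by_cases hc : c = 'X'
    · subst hc
      rw [if_pos rfl, if_pos rfl]
      simp only [List.map, List.sum_cons, List.length_reverse]
      have h0 := ih [] ans
      simp only [List.length_nil, Nat.cast_zero, pvTri_zero, add_zero] at h0
      rw [h0]; ring
    · rw [if_neg hc, if_neg hc]
      have h2 := ih (c :: cur) (ans + ((cur.length : Int) + 1))
      rw [show ((c :: cur).length : Int) = (cur.length : Int) + 1 by simp] at h2
      rw [show pvTri (c :: cur).length = pvTri cur.length + ((cur.length : Int) + 1) from by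
        simp only [List.length_cons]; rw [pvTri_succ]] at h2
      linarith [h2]

-- ===== VERDICT (by name: the statement is the Claim_ definition above) =====
theorem solution_spec : Claim_equal_solution := by
  intro str _
  unfold Spec_solution solution solution_alt
  simp only [splitOn_eq_pvSplit]
  rw [pvFoldA]
  have h := pvMain str.toList [] 0
  simp only [List.length_nil, Nat.cast_zero, pvTri_zero, add_zero, zero_add] at h
  rw [h]; ring
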